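-- pv_equiv track=rewrite | github.com/ElliottSax/engineer | training_iterations/training_iteration58.py | exclusive_time_functions
-- ===== SOURCE A (Python) =====
-- def exclusive_time_functions(n, logs):
--     """Exclusive time of each function."""
--     result = [0] * n
--     stack = []
--     prev_time = 0
--
--     for log in logs:
--         parts = log.split(':')
--         func_id = int(parts[0])
--         typ = parts[1]
--         time = int(parts[2])
--
--         if typ == 'start':
--             if stack:
--                 result[stack[-1]] += time - prev_time
--             stack.append(func_id)
--             prev_time = time
--         else:
--             result[stack.pop()] += time - prev_time + 1
--             prev_time = time + 1
--
--     return result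
-- ===== SOURCE B (Python) =====
-- def exclusive_time_functions(n, logs):
--     """Exclusive time of each function: two phases — collect per-call
--     (func_id, exclusive) contributions with per-frame child-time frames,
--     then aggregate them into the result array."""
--     contrib = []
--     stack = []  # frames: (func_id, start_time, child_time)
--
--     for log in logs:
--         parts = log.split(':')
--         time = int(parts[2])
--         if parts[1] == 'start':
--             stack.append((int(parts[0]), time, 0))
--         else:
--             f, s, child = stack.pop()
--             total = time - s + 1
--             contrib.append((f, total - child))
--             if stack:
--                 p, ps, pc = stack[-1]
--                 stack[-1] = (p, ps, pc + total)
--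
--     result = [0] * n
--     for f, e in contrib:
--         result[f] += e
--     return result
-- ===== Notes on version B (the rewrite author's own statement) =====
-- stated objective: alternative
-- what changed: Replaces A's global prev_time delta accounting with a two-phase algorithm: phase 1 walks the logs with a stack of (func_id, start_time, child_time) frames and emits each call's (func_id, exclusive) contribution once, at its 'end'; phase 2 aggregates the contribution list into the result array.
-- outside the precondition, e.g. on exclusive_time_functions(2, ['0:start:0', '1:start:2']): A returns [2, 0], B returns [0, 0]
import Mathlib
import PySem

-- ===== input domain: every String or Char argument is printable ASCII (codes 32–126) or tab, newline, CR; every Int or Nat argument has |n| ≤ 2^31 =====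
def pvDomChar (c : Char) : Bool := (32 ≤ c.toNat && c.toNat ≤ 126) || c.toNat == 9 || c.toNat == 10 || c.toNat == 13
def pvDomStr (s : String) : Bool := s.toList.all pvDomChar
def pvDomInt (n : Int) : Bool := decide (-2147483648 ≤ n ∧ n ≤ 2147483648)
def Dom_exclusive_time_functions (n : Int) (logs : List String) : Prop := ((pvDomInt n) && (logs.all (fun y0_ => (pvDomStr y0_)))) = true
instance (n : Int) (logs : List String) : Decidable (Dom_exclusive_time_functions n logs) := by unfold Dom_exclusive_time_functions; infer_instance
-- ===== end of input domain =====

-- B replaces A's global prev_time delta accounting with a two-phase algorithm (collect per-call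
-- contributions with per-frame child times, then aggregate); alternative decomposition, same cost.

-- result[i] += v  (Python negative-index semantics; out-of-range is excluded by Pre_)
def pyIncr (res : List Int) (i v : Int) : List Int :=
  PySem.List.pySetD res i (PySem.List.pyGetD res i 0 + v)

-- ===== PORT A =====
-- log.split(':')
def partsOf (log : String) : List String := (PySem.Str.split? log ":").getD []

-- state: (result, stack of func_ids with top at head, prev_time)
def stepA (st : List Int × List Int × Int) (log : String) : List Int × List Int × Int :=
  let result := st.1
  let stack := st.2.1
  let prev := st.2.2
  let parts := partsOf log
  let func_id := (PySem.Int.ofStr? (parts.getD 0 "")).getD 0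
  let typ := parts.getD 1 ""
  let time := (PySem.Int.ofStr? (parts.getD 2 "")).getD 0
  if typ == "start" then
    ((match stack with
      | top :: _ => pyIncr result top (time - prev)
      | [] => result), func_id :: stack, time)
  else
    match stack with
    | top :: rest => (pyIncr result top (time - prev + 1), rest, time + 1)
    | [] => (result, [], time + 1)   -- Python raises here (pop from empty); excluded by Pre_

def exclusive_time_functions (n : Int) (logs : List String) : List Int :=
  (logs.foldl stepA (List.replicate n.toNat 0, [], 0)).1

-- ===== PORT B =====
-- phase 1: walk the logs with a stack of frames (func_id, start_time, child_time), top at head,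
-- emitting each finished call's (func_id, exclusive) pair in completion order
def collectB : List String → List (Int × Int) → List (Int × Int × Int) → List (Int × Int)
  | [], contrib, _ => contrib
  | log :: more, contrib, stack =>
    let parts := (PySem.Str.split? log ":").getD []
    let time := (PySem.Int.ofStr? (parts.getD 2 "")).getD 0
    if parts.getD 1 "" == "start" then
      collectB more contrib (((PySem.Int.ofStr? (parts.getD 0 "")).getD 0, time, 0) :: stack)
    else
      match stack with
      | (f, s, child) :: rest =>
        let total := time - s + 1
        collectB more (contrib ++ [(f, total - child)])
          (match rest with
           | (g, gs, gc) :: rr => (g, gs, gc + total) :: rr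
           | [] => [])
      | [] => collectB more contrib []   -- Python raises here; excluded by Pre_

-- phase 2: result[f] += e for each contribution
def tallyB (res : List Int) : List (Int × Int) → List Int
  | [] => res
  | fe :: more => tallyB (pyIncr res fe.1 fe.2) more

def exclusive_time_functions_alt (n : Int) (logs : List String) : List Int :=
  tallyB (List.replicate n.toNat 0) (collectB logs [] [])

-- ===== PRECONDITION & SPEC =====
-- Pre_ excludes malformed logs: entries without three ':'-fields or with unparsable int fields,
-- function ids outside [-n, n), and an 'end' with no open frame — on all of those A raises
-- (IndexError/ValueError) — and logs with unfinished 'start' frames left at the end, on which A's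
-- partial crediting of ancestor frames is an accident of its delta accounting and B's ignoring of
-- never-ended frames is equally defensible (no output is specified for truncated traces).
def goodLog (n : Int) (log : String) : Bool :=
  let parts := partsOf log
  decide (3 ≤ parts.length) &&
  (match PySem.Int.ofStr? (parts.getD 0 ""), PySem.Int.ofStr? (parts.getD 2 "") with
   | some fid, some _ => decide (-n ≤ fid ∧ fid < n)
   | _, _ => false)

-- open-frame depth check: 'start' pushes, anything else pops (none = pop of an empty stack)
def depthStep (d : Option Nat) (log : String) : Option Nat :=
  match d with
  | none => none
  | some k =>
    if (partsOf log).getD 1 "" == "start" then some (k + 1)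
    else match k with
         | 0 => none
         | Nat.succ k' => some k'

def Pre_exclusive_time_functions (n : Int) (logs : List String) : Prop :=
  logs.all (goodLog n) = true ∧ logs.foldl depthStep (some 0) = some 0

instance (n : Int) (logs : List String) : Decidable (Pre_exclusive_time_functions n logs) := by
  unfold Pre_exclusive_time_functions; infer_instance

def pvWitness_exclusive_time_functions : Int × List String :=
  (2, ["0:start:0", "1:start:2", "1:end:5", "0:end:6"])

def Spec_exclusive_time_functions (n : Int) (logs : List String) (out : List Int) : Prop := out = exclusive_time_functions_alt n logs
instance (n : Int) (logs : List String) (out : List Int) : Decidable (Spec_exclusive_time_functions n logs out) := by unfold Spec_exclusive_time_functions; infer_instance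

-- ===== CLAIM (what is proved, stated in full; the proofs are below) =====
def Claim_equal_exclusive_time_functions : Prop := ∀ (n : Int) (logs : List String), Dom_exclusive_time_functions n logs → Pre_exclusive_time_functions n logs → Spec_exclusive_time_functions n logs (exclusive_time_functions n logs)

-- ===== LEMMAS AND PROOFS =====

-- field accessors of a log line (proof-side names for the expressions both ports compute)
def fidOf (l : String) : Int := (PySem.Int.ofStr? ((partsOf l).getD 0 "")).getD 0
def timeOf (l : String) : Int := (PySem.Int.ofStr? ((partsOf l).getD 2 "")).getD 0
def typIsStart (l : String) : Bool := (partsOf l).getD 1 "" == "start"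

-- proof-side single-pass formulation of B (state: result and frame stack), used as a bridge
def stepB (st : List Int × List (Int × Int × Int)) (log : String) :
    List Int × List (Int × Int × Int) :=
  let result := st.1
  let stack := st.2
  if typIsStart log then
    (result, (fidOf log, timeOf log, 0) :: stack)
  else
    match stack with
    | (fid, start, child) :: rest =>
      let total := timeOf log - start + 1
      (pyIncr result fid (total - child),
       match rest with
       | (g, s2, c2) :: rr => (g, s2, c2 + total) :: rr
       | [] => [])
    | [] => (result, [])

lemma stepA_eval (res : List Int) (stack : List Int) (prev : Int) (l : String) :
    stepA (res, stack, prev) l =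
      if typIsStart l then
        ((match stack with
          | top :: _ => pyIncr res top (timeOf l - prev)
          | [] => res), fidOf l :: stack, timeOf l)
      else
        match stack with
        | top :: rest => (pyIncr res top (timeOf l - prev + 1), rest, timeOf l + 1)
        | [] => (res, [], timeOf l + 1) := rfl

lemma collectB_eval (l : String) (more : List String) (contrib : List (Int × Int))
    (stack : List (Int × Int × Int)) :
    collectB (l :: more) contrib stack =
      if typIsStart l then
        collectB more contrib ((fidOf l, timeOf l, 0) :: stack)
      else
        match stack with
        | (f, s, child) :: rest =>
          collectB more (contrib ++ [(f, timeOf l - s + 1 - child)])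
            (match rest with
             | (g, gs, gc) :: rr => (g, gs, gc + (timeOf l - s + 1)) :: rr
             | [] => [])
        | [] => collectB more contrib [] := rfl

lemma depthStep_some (k : Nat) (l : String) :
    depthStep (some k) l =
      if typIsStart l then some (k + 1)
      else match k with
           | 0 => none
           | Nat.succ k' => some k' := rfl

lemma tallyB_append (contrib : List (Int × Int)) :
    ∀ (res : List Int) (f e : Int),
      tallyB res (contrib ++ [(f, e)]) = pyIncr (tallyB res contrib) f e := by
  induction contrib with
  | nil => intro res f e; simp [tallyB]
  | cons fe more ih => intro res f e; simp only [List.cons_append, tallyB]; exact ih _ f e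

-- bridge: B's two phases compute the single-pass stepB fold
lemma tallyB_collectB (logs : List String) :
    ∀ (contrib : List (Int × Int)) (stack : List (Int × Int × Int)) (res : List Int),
      tallyB res (collectB logs contrib stack)
        = (logs.foldl stepB (tallyB res contrib, stack)).1 := by
  induction logs with
  | nil => intro contrib stack res; simp [collectB]
  | cons l more ih =>
    intro contrib stack res
    rw [collectB_eval, List.foldl_cons, stepB]
    by_cases h : typIsStart l = true
    · rw [if_pos h, if_pos h]; exact ih contrib _ res
    · rw [if_neg h, if_neg h]
      cases stack with
      | nil => exact ih contrib [] res
      | cons fr rest =>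
        obtain ⟨f, s, c⟩ := fr
        have := ih (contrib ++ [(f, timeOf l - s + 1 - c)])
          (match rest with
           | (g, gs, gc) :: rr => (g, gs, gc + (timeOf l - s + 1)) :: rr
           | [] => []) res
        rw [tallyB_append] at this
        exact this

-- what A has additionally credited to the currently open frames, expressed from B's state:
-- the top frame (with the current prev-ish time t) has received t - start - child, a deeper
-- frame the same with t replaced by the start time of the frame above it.
def creditAll (t : Int) : List (Int × Int × Int) → List Int → List Int
  | [], res => res
  | (f, s, c) :: rest, res => creditAll s rest (pyIncr res f (t - s - c))

lemma pyIdx?_lt_of_some {L : Nat} {i : Int} {k : Nat} (h : PySem.List.pyIdx? L i = some k) :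
    k < L := by
  unfold PySem.List.pyIdx? at h
  split_ifs at h <;> simp_all <;> omega

lemma pyIncr_eq_set {res : List Int} {i : Int} {k : Nat}
    (hk : PySem.List.pyIdx? res.length i = some k) (v : Int) :
    pyIncr res i v = res.set k (res[k]'(pyIdx?_lt_of_some hk) + v) := by
  have hlt := pyIdx?_lt_of_some hk
  simp [pyIncr, PySem.List.pySetD, PySem.List.pySet?, PySem.List.pyGetD, PySem.List.pyGet?, hk,
    List.getElem?_eq_getElem hlt]

lemma pyIncr_eq_self {res : List Int} {i : Int}
    (hk : PySem.List.pyIdx? res.length i = none) (v : Int) :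
    pyIncr res i v = res := by
  simp [pyIncr, PySem.List.pySetD, PySem.List.pySet?, hk]

lemma length_pyIncr (res : List Int) (i v : Int) : (pyIncr res i v).length = res.length := by
  cases hk : PySem.List.pyIdx? res.length i with
  | none => rw [pyIncr_eq_self hk]
  | some k => rw [pyIncr_eq_set hk]; simp

lemma pyIncr_add (res : List Int) (i a b : Int) :
    pyIncr (pyIncr res i a) i b = pyIncr res i (a + b) := by
  cases hk : PySem.List.pyIdx? res.length i with
  | none => rw [pyIncr_eq_self hk, pyIncr_eq_self hk, pyIncr_eq_self hk]
  | some k =>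
    have h2 : PySem.List.pyIdx? (pyIncr res i a).length i = some k := by
      rw [length_pyIncr]; exact hk
    rw [pyIncr_eq_set hk a, pyIncr_eq_set hk (a + b)]
    rw [pyIncr_eq_set (res := res.set k _) (by simpa using hk) b]
    simp [List.getElem_set_self, List.set_set]
    ring_nf

lemma pyIncr_zero (res : List Int) (i : Int) : pyIncr res i 0 = res := by
  cases hk : PySem.List.pyIdx? res.length i with
  | none => exact pyIncr_eq_self hk 0
  | some k => rw [pyIncr_eq_set hk]; simp

lemma pyIncr_comm (res : List Int) (i j a b : Int) :
    pyIncr (pyIncr res i a) j b = pyIncr (pyIncr res j b) i a := by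
  cases hi : PySem.List.pyIdx? res.length i with
  | none =>
    rw [pyIncr_eq_self hi]
    cases hj : PySem.List.pyIdx? res.length j with
    | none => rw [pyIncr_eq_self hj, pyIncr_eq_self hi]
    | some m =>
      rw [pyIncr_eq_set hj]
      exact (pyIncr_eq_self (by simpa using hi) a).symm
  | some k =>
    cases hj : PySem.List.pyIdx? res.length j with
    | none =>
      rw [pyIncr_eq_self hj, pyIncr_eq_set hi]
      exact pyIncr_eq_self (by simpa using hj) b
    | some m =>
      rcases eq_or_ne k m with rfl | hne
      · rw [pyIncr_eq_set hi a, pyIncr_eq_set hj b]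
        rw [pyIncr_eq_set (res := res.set k _) (by simpa using hj) b,
            pyIncr_eq_set (res := res.set k _) (by simpa using hi) a]
        simp [List.getElem_set_self, List.set_set]
        ring_nf
      · rw [pyIncr_eq_set hi a, pyIncr_eq_set hj b]
        rw [pyIncr_eq_set (res := res.set k _) (by simpa using hj) b,
            pyIncr_eq_set (res := res.set m _) (by simpa using hi) a]
        rw [List.getElem_set_ne (by omega), List.getElem_set_ne (by omega)]
        exact List.set_comm _ _ (by omega)

lemma creditAll_pyIncr (st : List (Int × Int × Int)) :
    ∀ (t : Int) (res : List Int) (i v : Int),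
      creditAll t st (pyIncr res i v) = pyIncr (creditAll t st res) i v := by
  induction st with
  | nil => intro t res i v; simp [creditAll]
  | cons fr rest ih =>
    intro t res i v
    obtain ⟨f, s, c⟩ := fr
    simp only [creditAll]
    rw [pyIncr_comm, ih]

lemma creditAll_start_nil (t fid : Int) (resB : List Int) :
    creditAll t [(fid, t, 0)] resB = resB := by
  simp only [creditAll]
  rw [show t - t - 0 = 0 by ring, pyIncr_zero]

lemma creditAll_start_cons (t prev fid g s c : Int) (rest : List (Int × Int × Int))
    (resB : List Int) :
    creditAll t ((fid, t, 0) :: (g, s, c) :: rest) resB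
      = pyIncr (creditAll prev ((g, s, c) :: rest) resB) g (t - prev) := by
  simp only [creditAll]
  rw [show t - t - 0 = 0 by ring, pyIncr_zero, creditAll_pyIncr, creditAll_pyIncr, pyIncr_add,
    show prev - s - c + (t - prev) = t - s - c by ring]

lemma creditAll_end_nil (t prev f s c : Int) (resB : List Int) :
    pyIncr (creditAll prev [(f, s, c)] resB) f (t - prev + 1)
      = pyIncr resB f (t - s + 1 - c) := by
  simp only [creditAll]
  rw [pyIncr_add, show prev - s - c + (t - prev + 1) = t - s + 1 - c by ring]

lemma creditAll_end_cons (t prev f s c g s2 c2 : Int) (rr : List (Int × Int × Int))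
    (resB : List Int) :
    pyIncr (creditAll prev ((f, s, c) :: (g, s2, c2) :: rr) resB) f (t - prev + 1)
      = creditAll (t + 1) ((g, s2, c2 + (t - s + 1)) :: rr)
          (pyIncr resB f (t - s + 1 - c)) := by
  simp only [creditAll, creditAll_pyIncr]
  rw [pyIncr_comm, pyIncr_add,
    show prev - s - c + (t - prev + 1) = t - s + 1 - c by ring,
    show t + 1 - s2 - (c2 + (t - s + 1)) = s - s2 - c2 by ring]

lemma foldl_depthStep_none (logs : List String) : logs.foldl depthStep none = none := by
  induction logs with
  | nil => rfl
  | cons l ls ih => simpa [depthStep] using ih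

-- the main invariant: A's running result is B's (single-pass) running result plus the pending credits
lemma main_inv (logs : List String) :
    ∀ (resB : List Int) (stB : List (Int × Int × Int)) (prev : Int),
      logs.foldl depthStep (some stB.length) = some 0 →
      (logs.foldl stepA (creditAll prev stB resB, stB.map (fun fr => fr.1), prev)).1
        = (logs.foldl stepB (resB, stB)).1 := by
  induction logs with
  | nil =>
    intro resB stB prev hd
    simp only [List.foldl_nil] at hd ⊢
    have : stB.length = 0 := by simpa using hd
    have hst : stB = [] := List.length_eq_zero_iff.mp this
    subst hst
    simp [creditAll]
  | cons l ls ih =>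
    intro resB stB prev hd
    rw [List.foldl_cons, depthStep_some] at hd
    rw [List.foldl_cons, List.foldl_cons, stepA_eval, stepB]
    by_cases h : typIsStart l = true
    · -- 'start': push a frame
      rw [if_pos h] at hd
      rw [if_pos h, if_pos h]
      cases stB with
      | nil =>
        have := ih resB [(fidOf l, timeOf l, 0)] (timeOf l) (by simpa using hd)
        rw [creditAll_start_nil] at this
        simpa [creditAll] using this
      | cons fr rest =>
        obtain ⟨g, s, c⟩ := fr
        have := ih resB ((fidOf l, timeOf l, 0) :: (g, s, c) :: rest) (timeOf l)
          (by simpa using hd)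
        rw [creditAll_start_cons (prev := prev)] at this
        simpa [creditAll] using this
    · -- 'end': pop a frame
      rw [if_neg h] at hd
      rw [if_neg h, if_neg h]
      cases stB with
      | nil =>
        exfalso
        simp only [List.length_nil] at hd
        rw [foldl_depthStep_none] at hd
        simp at hd
      | cons fr rest =>
        obtain ⟨f, s, c⟩ := fr
        simp only [List.length_cons] at hd
        cases rest with
        | nil =>
          have := ih (pyIncr resB f (timeOf l - s + 1 - c)) [] (timeOf l + 1)
            (by simpa using hd)
          simp only [List.map_cons, List.map_nil]
          rw [creditAll_end_nil (s := s) (c := c)]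
          simpa [creditAll] using this
        | cons fr2 rr =>
          obtain ⟨g, s2, c2⟩ := fr2
          have := ih (pyIncr resB f (timeOf l - s + 1 - c))
            ((g, s2, c2 + (timeOf l - s + 1)) :: rr) (timeOf l + 1) (by simpa using hd)
          simp only [List.map_cons]
          rw [creditAll_end_cons (s := s) (c := c)]
          exact this

-- ===== VERDICT (by name: the statement is the Claim_ definition above) =====
theorem exclusive_time_functions_spec : Claim_equal_exclusive_time_functions := by
  intro n logs _ hpre
  unfold Spec_exclusive_time_functions exclusive_time_functions exclusive_time_functions_alt
  rw [tallyB_collectB logs [] [] (List.replicate n.toNat 0)]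
  have := main_inv logs (List.replicate n.toNat 0) [] 0 (by simpa using hpre.2)
  simp only [tallyB]
  simpa [creditAll] using this
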